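-- pv_equiv track=rewrite | github.com/NimaMohammadii/vexa-ai | modules/gpt/service.py | _clean_candidate
-- ===== SOURCE A (Python) =====
-- def _clean_candidate(text: str) -> str:
--     """Normalise a text snippet that may contain an API key."""
--
--     candidate = (text or "").strip()
--     candidate = candidate.strip('"')
--     candidate = candidate.strip("'")
--     if not candidate:
--         return ""
--
--     if candidate.startswith(("{", "[")):
--         # Likely JSON; let the caller decode separately
--         return candidate
--
--     if "sk-" in candidate:
--         candidate = candidate[candidate.index("sk-") :]
--
--     # Stop at obvious separators to avoid trailing punctuation
--     for separator in ("\n", "\r", "\t", " ", ",", ";"):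
--         if separator in candidate:
--             candidate = candidate.split(separator, 1)[0]
--
--     candidate = candidate.strip()
--     candidate = candidate.strip('"')
--     candidate = candidate.strip("'")
--     if not candidate:
--         return ""
--
--     return candidate
-- ===== SOURCE B (Python) =====
-- def _clean_candidate(text: str) -> str:
--     """Normalise a text snippet that may contain an API key."""
--
--     candidate = (text or "").strip().strip('"').strip("'")
--     if not candidate:
--         return ""
--
--     if candidate[0] in "{[":
--         # Likely JSON; let the caller decode separately
--         return candidate
--
--     pos = candidate.find("sk-")
--     if pos != -1:
--         candidate = candidate[pos:]
--
--     # Keep characters up to the first separator, in one pass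
--     kept = []
--     for ch in candidate:
--         if ch in "\n\r\t ,;":
--             break
--         kept.append(ch)
--
--     return "".join(kept).strip().strip('"').strip("'")
-- ===== Notes on version B (the rewrite author's own statement) =====
-- stated objective: simpler
-- what changed: B replaces A's loop of six sequential split(sep,1)[0] truncations (each rescanning the string via 'in' plus split) with a single pass that keeps characters up to the first separator character; guards are expressed directly (candidate[0] in '{[', find != -1).
import Mathlib
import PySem

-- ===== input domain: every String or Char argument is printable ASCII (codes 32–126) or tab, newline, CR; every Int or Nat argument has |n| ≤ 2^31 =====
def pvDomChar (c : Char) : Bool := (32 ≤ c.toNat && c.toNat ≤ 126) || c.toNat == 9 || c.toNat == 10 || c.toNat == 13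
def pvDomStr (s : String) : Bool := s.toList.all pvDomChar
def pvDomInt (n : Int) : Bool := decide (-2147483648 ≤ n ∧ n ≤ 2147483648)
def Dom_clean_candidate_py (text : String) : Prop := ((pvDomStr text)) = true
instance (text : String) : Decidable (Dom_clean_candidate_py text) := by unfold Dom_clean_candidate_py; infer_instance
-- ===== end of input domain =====

-- B replaces A's six sequential `split(sep, 1)[0]` truncations with one takeWhile pass
-- that stops at the first separator character (objective: simpler, one pass).

-- ===== PORT A =====
-- one iteration of A's separator loop: `if separator in candidate: candidate = candidate.split(separator, 1)[0]`
def pvSplitStep (cand : List Char) (sep : List Char) : List Char :=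
  if PySem.Chars.isIn sep cand then (PySem.Chars.splitOnMax cand sep 1).headD [] else cand

def clean_candidate_py (text : String) : String :=
  let c0 := PySem.Chars.strip text.toList          -- (text or "").strip()
  let c1 := PySem.Chars.stripChars c0 ['"']        -- .strip('"')
  let c2 := PySem.Chars.stripChars c1 ['\'']       -- .strip("'")
  if c2 = [] then ""                               -- if not candidate: return ""
  else if PySem.Chars.startswith c2 ['{'] || PySem.Chars.startswith c2 ['['] then
    String.ofList c2                               -- likely JSON
  else
    let c3 := if PySem.Chars.isIn ['s','k','-'] c2 then
        PySem.Chars.slice c2 (some (PySem.Chars.find c2 ['s','k','-'])) none   -- candidate[candidate.index("sk-"):]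
      else c2
    let c4 := [['\n'],['\r'],['\t'],[' '],[','],[';']].foldl pvSplitStep c3    -- the separator loop
    let c5 := PySem.Chars.stripChars (PySem.Chars.stripChars (PySem.Chars.strip c4) ['"']) ['\'']
    if c5 = [] then "" else String.ofList c5

-- ===== PORT B =====
def clean_candidate_py_alt (text : String) : String :=
  let cand := PySem.Chars.stripChars (PySem.Chars.stripChars (PySem.Chars.strip text.toList) ['"']) ['\'']
  match cand with
  | [] => ""
  | c :: _ =>
    if c = '{' || c = '[' then String.ofList cand
    else
      let pos := PySem.Chars.find cand ['s','k','-']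
      let cand2 := if pos ≠ -1 then PySem.Chars.slice cand (some pos) none else cand
      -- B's single pass: keep characters until the first separator (the loop with `break`)
      let kept := cand2.takeWhile (fun ch => !(['\n','\r','\t',' ',',',';'].contains ch))
      String.ofList (PySem.Chars.stripChars (PySem.Chars.stripChars (PySem.Chars.strip kept) ['"']) ['\''])

-- ===== PRECONDITION & SPEC =====
def Spec_clean_candidate_py (text : String) (out : String) : Prop := out = clean_candidate_py_alt text
instance (text : String) (out : String) : Decidable (Spec_clean_candidate_py text out) := by unfold Spec_clean_candidate_py; infer_instance

-- ===== CLAIM (what is proved, stated in full; the proofs are below) =====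
def Claim_equal_clean_candidate_py : Prop := ∀ (text : String), Dom_clean_candidate_py text → Spec_clean_candidate_py text (clean_candidate_py text)

-- ===== LEMMAS AND PROOFS =====

-- once the separator has been found, `go` with maxsplit budget 0 closes the current piece
lemma pvGo_zero_head (c : Char) (fuel : Nat) (l p : List Char) :
    (PySem.Chars.splitOnMax.go [c] fuel 0 l [] [p]).head?.getD [] = p := by
  cases fuel with
  | zero => simp [PySem.Chars.splitOnMax.go]
  | succ f => cases l <;> simp [PySem.Chars.splitOnMax.go]

-- the first piece of split(sep, 1) ends at sep's first occurrence
lemma pvGo_head (c : Char) (l : List Char) : ∀ (fuel : Nat) (cur : List Char), l.length < fuel →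
    (PySem.Chars.splitOnMax.go [c] fuel 1 l cur []).headD [] = cur.reverse ++ l.takeWhile (· ≠ c) := by
  induction l with
  | nil => intro fuel cur h
           cases fuel with
           | zero => omega
           | succ f => simp [PySem.Chars.splitOnMax.go]
  | cons a rest ih =>
      intro fuel cur h
      cases fuel with
      | zero => omega
      | succ f =>
        by_cases hac : a = c
        · subst hac
          simp only [PySem.Chars.splitOnMax.go, List.isPrefixOf]
          simp [pvGo_zero_head]
        · simp only [PySem.Chars.splitOnMax.go, List.isPrefixOf]
          rw [if_neg (by omega), if_neg (by simp [Ne.symm hac])]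
          rw [ih f (a :: cur) (by simp at h; omega)]
          simp [hac]

-- A's loop body, for a one-character separator, is exactly "truncate before the first c"
lemma pvSplitStep_eq (c : Char) (l : List Char) :
    pvSplitStep l [c] = l.takeWhile (· ≠ c) := by
  by_cases h : PySem.Chars.isIn [c] l = true
  · simp [pvSplitStep, h, PySem.Chars.splitOnMax]
    have hg := pvGo_head c l (l.length + 1) [] (by omega)
    simpa using hg
  · simp only [pvSplitStep, h, Bool.false_eq_true, if_false]
    symm
    rw [List.takeWhile_eq_self_iff]
    intro x hx
    simp only [decide_eq_true_eq]
    rintro rfl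
    rw [Bool.not_eq_true] at h
    obtain ⟨s, t, rfl⟩ := List.append_of_mem hx
    exact (PySem.Chars.isIn_eq_false_iff _ _).mp h ⟨s, t, by simp⟩

-- A's whole separator loop collapses to B's single takeWhile pass
lemma pvLoop_eq_takeWhile (l : List Char) :
    [['\n'],['\r'],['\t'],[' '],[','],[';']].foldl pvSplitStep l
      = l.takeWhile (fun ch => !(['\n','\r','\t',' ',',',';'].contains ch)) := by
  simp only [List.foldl_cons, List.foldl_nil, pvSplitStep_eq, List.takeWhile_takeWhile]
  congr 1
  funext ch
  simp only [List.contains_cons, List.contains_nil]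
  by_cases h1 : ch = '\n' <;> by_cases h2 : ch = '\r' <;> by_cases h3 : ch = '\t' <;>
    by_cases h4 : ch = ' ' <;> by_cases h5 : ch = ',' <;> by_cases h6 : ch = ';' <;>
    simp [h1, h2, h3, h4, h5, h6]

-- ===== VERDICT (by name: the statement is the Claim_ definition above) =====
theorem clean_candidate_py_spec : Claim_equal_clean_candidate_py := by
  unfold Claim_equal_clean_candidate_py Spec_clean_candidate_py
  intro text _
  unfold clean_candidate_py clean_candidate_py_alt
  cases hc : PySem.Chars.stripChars (PySem.Chars.stripChars (PySem.Chars.strip text.toList) ['"']) ['\''] with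
  | nil => simp [hc]
  | cons c rest =>
    simp only [hc]
    by_cases hjson : c = '{' ∨ c = '['
    · rcases hjson with h | h <;> subst h <;> simp [PySem.Chars.startswith, List.isPrefixOf]
    · rw [not_or] at hjson
      have h1 : (PySem.Chars.startswith (c :: rest) ['{'] || PySem.Chars.startswith (c :: rest) ['[']) = false := by
        simp only [PySem.Chars.startswith, List.isPrefixOf, Bool.or_eq_false_iff,
          Bool.and_eq_false_iff, beq_eq_false_iff_ne, ne_eq]
        exact ⟨Or.inl fun h => hjson.1 h.symm, Or.inl fun h => hjson.2 h.symm⟩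
      have h2 : (c = '{' || c = '[') = false := by
        simp only [Bool.or_eq_false_iff, decide_eq_false_iff_not]
        exact hjson
      simp only [h1, h2, Bool.false_eq_true, if_false, reduceCtorEq]
      by_cases hsk : PySem.Chars.isIn ['s','k','-'] (c :: rest) = true
      · have hf : PySem.Chars.find (c :: rest) ['s','k','-'] ≠ -1 :=
          (PySem.Chars.find_ne_neg_one_iff _ _).mpr ((PySem.Chars.isIn_iff_infix _ _).mp hsk)
        simp only [hsk, hf, ne_eq, not_false_iff, if_pos, pvLoop_eq_takeWhile]
        split <;> simp_all
      · have hf : ¬ PySem.Chars.find (c :: rest) ['s','k','-'] ≠ -1 := by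
          simp only [ne_eq, not_not]
          rw [PySem.Chars.find_eq_neg_one_iff]
          rw [Bool.not_eq_true] at hsk
          exact (PySem.Chars.isIn_eq_false_iff _ _).mp hsk
        simp only [hsk, Bool.false_eq_true, if_false, hf, pvLoop_eq_takeWhile]
        split <;> simp_all
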